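-- pv_equiv track=rewrite | github.com/Juhertra/dev | detectors/modsecurity_integration.py | _split_modsecurity_rules
-- ===== SOURCE A (Python) =====
-- from typing import Any, Dict, List, Optional
--
-- def _split_modsecurity_rules(content: str) -> List[str]:
--     """Split ModSecurity content into individual rules."""
--     # Remove comments and empty lines
--     lines = []
--     for line in content.split('\n'):
--         line = line.strip()
--         if line and not line.startswith('#'):
--             lines.append(line)
--
--     # Group lines into rules (SecRule directives)
--     rules = []
--     current_rule = []
--
--     for line in lines:
--         if line.startswith('SecRule'):
--             if current_rule:
--                 rules.append('\n'.join(current_rule))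
--             current_rule = [line]
--         elif current_rule:
--             current_rule.append(line)
--
--     if current_rule:
--         rules.append('\n'.join(current_rule))
--
--     return rules
-- ===== SOURCE B (Python) =====
-- def _split_modsecurity_rules(content: str):
--     """Split ModSecurity content into individual rules (output built back-to-front)."""
--     lines = [s for s in (raw.strip() for raw in content.split('\n'))
--              if s and not s.startswith('#')]
--     rules, tail = [], []
--     for line in reversed(lines):
--         if line.startswith('SecRule'):
--             rules = ['\n'.join([line] + tail)] + rules
--             tail = []
--         else:
--             tail = [line] + tail
--     return rules
-- ===== Notes on version B (the rewrite author's own statement) =====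
-- stated objective: alternative
-- what changed: B cleans lines with a comprehension and then builds the rule list back-to-front in a single right-to-left pass (a SecRule line absorbs the pending tail of continuation lines), instead of A's left-to-right accumulator that is flushed on each SecRule and once more after the loop.
import Mathlib
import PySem

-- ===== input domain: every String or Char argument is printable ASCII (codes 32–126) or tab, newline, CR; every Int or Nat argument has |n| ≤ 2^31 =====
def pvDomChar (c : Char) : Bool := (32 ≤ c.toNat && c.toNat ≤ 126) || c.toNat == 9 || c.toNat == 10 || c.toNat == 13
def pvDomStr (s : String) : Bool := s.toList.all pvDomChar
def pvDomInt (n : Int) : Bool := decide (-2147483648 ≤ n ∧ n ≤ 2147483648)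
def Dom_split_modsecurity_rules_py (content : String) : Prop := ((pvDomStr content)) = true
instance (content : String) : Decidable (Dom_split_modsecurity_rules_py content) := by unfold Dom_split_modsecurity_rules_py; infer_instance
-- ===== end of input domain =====

-- B builds the rule list back-to-front in one right-to-left pass instead of A's
-- flushed left-to-right accumulator; alternative decomposition, same cost.

-- ===== PORT A =====
-- A's loop body: flush current_rule on a SecRule line, else append to a nonempty current_rule
def pvStepA (s : List String × List String) (line : String) : List String × List String :=
  if PySem.Str.startswith line "SecRule" then
    ((if s.2 ≠ [] then s.1 ++ [PySem.Str.join "\n" s.2] else s.1), [line])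
  else if s.2 ≠ [] then (s.1, s.2 ++ [line]) else s

-- A: left-to-right loop with a current_rule accumulator flushed on each SecRule and at the end.
def split_modsecurity_rules_py (content : String) : List String :=
  let lines := ((PySem.Str.split? content "\n").getD []).foldl
    (fun acc raw =>
      let line := PySem.Str.strip raw
      if !(line == "") && !(PySem.Str.startswith line "#") then acc ++ [line] else acc) []
  let st := lines.foldl pvStepA ([], [])
  if st.2 ≠ [] then st.1 ++ [PySem.Str.join "\n" st.2] else st.1

-- ===== PORT B =====
-- B's loop body (right-to-left): a SecRule line absorbs the pending tail and prepends a finished rule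
def pvStepB (s : List String × List String) (line : String) : List String × List String :=
  if PySem.Str.startswith line "SecRule" then
    ([PySem.Str.join "\n" ([line] ++ s.2)] ++ s.1, [])
  else (s.1, [line] ++ s.2)

-- B: comprehension-style cleaning, then one pass over reversed(lines) building rules back-to-front.
def split_modsecurity_rules_py_alt (content : String) : List String :=
  let lines := (((PySem.Str.split? content "\n").getD []).map PySem.Str.strip).filter
    (fun s => !(s == "") && !(PySem.Str.startswith s "#"))
  (lines.reverse.foldl pvStepB ([], [])).1

-- ===== PRECONDITION & SPEC =====
def Spec_split_modsecurity_rules_py (content : String) (out : List String) : Prop := out = split_modsecurity_rules_py_alt content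
instance (content : String) (out : List String) : Decidable (Spec_split_modsecurity_rules_py content out) := by unfold Spec_split_modsecurity_rules_py; infer_instance

-- ===== CLAIM (what is proved, stated in full; the proofs are below) =====
def Claim_equal_split_modsecurity_rules_py : Prop := ∀ (content : String), Dom_split_modsecurity_rules_py content → Spec_split_modsecurity_rules_py content (split_modsecurity_rules_py content)

-- ===== LEMMAS AND PROOFS =====

-- the two cleaning passes and A's final flush, named for the proofs
def pvCleanA (content : String) : List String :=
  ((PySem.Str.split? content "\n").getD []).foldl
    (fun acc raw =>
      let line := PySem.Str.strip raw
      if !(line == "") && !(PySem.Str.startswith line "#") then acc ++ [line] else acc) []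

def pvCleanB (content : String) : List String :=
  (((PySem.Str.split? content "\n").getD []).map PySem.Str.strip).filter
    (fun s => !(s == "") && !(PySem.Str.startswith s "#"))

def pvFlush (s : List String × List String) : List String :=
  if s.2 ≠ [] then s.1 ++ [PySem.Str.join "\n" s.2] else s.1

-- B's right-to-left grouping, as structural recursion (the foldr behind the reversed foldl)
def pvGroup (ls : List String) : List String × List String :=
  match ls with
  | [] => ([], [])
  | l :: rest => pvStepB (pvGroup rest) l

theorem pvA_eq (c : String) :
    split_modsecurity_rules_py c = pvFlush ((pvCleanA c).foldl pvStepA ([], [])) := rfl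

theorem pvB_eq (c : String) :
    split_modsecurity_rules_py_alt c = ((pvCleanB c).reverse.foldl pvStepB ([], [])).1 := rfl

theorem pv_clean_aux (xs : List String) (acc : List String) :
    xs.foldl (fun acc raw =>
        let line := PySem.Str.strip raw
        if !(line == "") && !(PySem.Str.startswith line "#") then acc ++ [line] else acc) acc
    = acc ++ (xs.map PySem.Str.strip).filter
        (fun s => !(s == "") && !(PySem.Str.startswith s "#")) := by
  induction xs generalizing acc with
  | nil => simp
  | cons x xs ih =>
      simp only [List.foldl_cons, List.map_cons, List.filter_cons]
      cases h : (!(PySem.Str.strip x == "") && !(PySem.Str.startswith (PySem.Str.strip x) "#")) with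
      | true => simp only [if_true, ih]; simp
      | false => simp only [if_false, ih, Bool.false_eq_true]

theorem pv_clean_eq (c : String) : pvCleanA c = pvCleanB c := by
  unfold pvCleanA pvCleanB
  simpa using pv_clean_aux _ []

theorem pv_group (ls : List String) :
    ls.reverse.foldl pvStepB ([], []) = pvGroup ls := by
  rw [List.foldl_reverse]
  induction ls with
  | nil => rfl
  | cons l ls ih => simp only [List.foldr_cons, ih]; rfl

theorem pv_main (ls rules cur : List String) :
    pvFlush (ls.foldl pvStepA (rules, cur))
    = if cur = [] then rules ++ (pvGroup ls).1
      else rules ++ (PySem.Str.join "\n" (cur ++ (pvGroup ls).2) :: (pvGroup ls).1) := by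
  induction ls generalizing rules cur with
  | nil => by_cases h : cur = [] <;> simp [pvFlush, pvGroup, h]
  | cons l ls ih =>
      simp only [List.foldl_cons]
      cases hp : PySem.Str.startswith l "SecRule" with
      | true =>
          have hp' : PySem.Chars.startswith l.toList ['S','e','c','R','u','l','e'] = true := by
            simpa using hp
          by_cases h : cur = []
          · have hs : pvStepA (rules, cur) l = (rules, [l]) := by simp [pvStepA, hp', h]
            rw [hs, ih]
            simp [pvGroup, pvStepB, hp', h]
          · have hs : pvStepA (rules, cur) l = (rules ++ [PySem.Str.join "\n" cur], [l]) := by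
              simp [pvStepA, hp', h]
            rw [hs, ih]
            simp [pvGroup, pvStepB, hp', h]
      | false =>
          have hp' : PySem.Chars.startswith l.toList ['S','e','c','R','u','l','e'] = false := by
            simpa using hp
          by_cases h : cur = []
          · have hs : pvStepA (rules, cur) l = (rules, cur) := by simp [pvStepA, hp', h]
            rw [hs, ih]
            simp [pvGroup, pvStepB, hp', h]
          · have hs : pvStepA (rules, cur) l = (rules, cur ++ [l]) := by simp [pvStepA, hp', h]
            rw [hs, ih]
            have hc : ¬ cur ++ [l] = [] := by simp
            simp [pvGroup, pvStepB, hp', h, hc]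

-- ===== VERDICT (by name: the statement is the Claim_ definition above) =====
theorem split_modsecurity_rules_py_spec : Claim_equal_split_modsecurity_rules_py := by
  intro content _
  unfold Spec_split_modsecurity_rules_py
  rw [pvA_eq, pvB_eq, pv_clean_eq, pv_group, pv_main]
  simp
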